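-- pv_equiv track=rewrite | github.com/orthon-engines/engines | prism/entry_points/signal_vector.py | group_engines_by_window
-- ===== SOURCE A (Python) =====
-- from typing import Dict, List, Any, Callable, Tuple, Set
--
-- def group_engines_by_window(
--     engines: List[str],
--     overrides: Dict[str, int],
--     default_window: int,
-- ) -> Dict[int, List[str]]:
--     """
--     Group engines by their required window size.
--
--     Args:
--         engines: List of engine names
--         overrides: Dict of {engine_name: window_size} from manifest
--         default_window: System default window size
--
--     Returns:
--         dict: {window_size: [engine_list]}
--     """
--     groups: Dict[int, List[str]] = {}
--
--     for engine in engines: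
--         window = overrides.get(engine, default_window)
--         if window not in groups:
--             groups[window] = []
--         groups[window].append(engine)
--
--     return groups
-- ===== SOURCE B (Python) =====
-- def group_engines_by_window(engines, overrides, default_window):
--     # Alternative decomposition: tag each engine with its window, dedup the
--     # windows in first-appearance order, then filter per window.
--     pairs = [(overrides.get(e, default_window), e) for e in engines]
--     order = dict.fromkeys(w for w, _ in pairs)
--     return {w: [e for ww, e in pairs if ww == w] for w in order}
-- ===== Notes on version B (the rewrite author's own statement) =====
-- stated objective: alternative
-- what changed: A builds the dict in one pass appending to per-key lists; B maps each engine to its window, dedups the windows in first-appearance order, and builds each group by filtering the tagged list per window.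
import Mathlib
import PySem

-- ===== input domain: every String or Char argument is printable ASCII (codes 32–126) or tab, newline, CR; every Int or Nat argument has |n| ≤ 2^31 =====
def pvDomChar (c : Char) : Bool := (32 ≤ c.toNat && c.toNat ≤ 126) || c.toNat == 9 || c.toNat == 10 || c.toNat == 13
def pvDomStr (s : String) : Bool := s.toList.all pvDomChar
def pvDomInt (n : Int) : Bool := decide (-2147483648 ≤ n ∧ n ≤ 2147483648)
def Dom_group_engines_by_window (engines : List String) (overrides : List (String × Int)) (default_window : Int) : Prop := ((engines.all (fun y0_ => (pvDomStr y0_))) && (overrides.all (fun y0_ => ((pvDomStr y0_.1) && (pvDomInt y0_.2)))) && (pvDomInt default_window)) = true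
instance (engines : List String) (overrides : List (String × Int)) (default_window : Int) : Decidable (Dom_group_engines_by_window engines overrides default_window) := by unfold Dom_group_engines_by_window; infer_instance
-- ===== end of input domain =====

-- B groups by a dedup-then-filter decomposition instead of A's single accumulating pass; same result.

-- ===== PORT A =====
-- A: one pass, appending each engine to groups[window] (inserting [] first when absent).
def group_engines_by_window (engines : List String) (overrides : List (String × Int)) (default_window : Int) : List (Int × List String) :=
  let ovr := PySem.Dict.ofList overrides
  (engines.foldl (fun (g : PySem.Dict Int (List String)) e =>
      let w := ovr.getD e default_window
      let g := if g.contains w then g else g.insert w ([] : List String)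
      g.modify w [] (fun l => l ++ [e]))
    PySem.Dict.empty).items

-- ===== PORT B =====
-- B: tag each engine with its window, dedup windows in first-appearance order, filter per window.
def group_engines_by_window_alt (engines : List String) (overrides : List (String × Int)) (default_window : Int) : List (Int × List String) :=
  let ovr := PySem.Dict.ofList overrides
  let pairs := engines.map (fun e => (ovr.getD e default_window, e))
  let order := PySem.List.dedup (pairs.map Prod.fst)
  order.map (fun w => (w, (pairs.filter (fun p => p.1 == w)).map Prod.snd))

-- ===== PRECONDITION & SPEC =====
def Spec_group_engines_by_window (engines : List String) (overrides : List (String × Int)) (default_window : Int) (out : List (Int × List String)) : Prop := out = group_engines_by_window_alt engines overrides default_window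
instance (engines : List String) (overrides : List (String × Int)) (default_window : Int) (out : List (Int × List String)) : Decidable (Spec_group_engines_by_window engines overrides default_window out) := by unfold Spec_group_engines_by_window; infer_instance

-- ===== CLAIM (what is proved, stated in full; the proofs are below) =====
def Claim_equal_group_engines_by_window : Prop := ∀ (engines : List String) (overrides : List (String × Int)) (default_window : Int), Dom_group_engines_by_window engines overrides default_window → Spec_group_engines_by_window engines overrides default_window (group_engines_by_window engines overrides default_window)

-- ===== LEMMAS AND PROOFS =====

-- A's setdefault-style "insert [] when absent, then append" step equals a plain modify-append step.
theorem step_eq (g : PySem.Dict Int (List String)) (w : Int) (e : String) :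
    (if g.contains w then g else g.insert w ([] : List String)).modify w [] (fun l => l ++ [e])
      = g.modify w [] (fun l => l ++ [e]) := by
  by_cases h : g.contains w = true
  · simp [h]
  · simp only [Bool.not_eq_true] at h
    simp [h, PySem.Dict.modify, PySem.Dict.getD_insert_self, PySem.Dict.getD_of_not_contains g [] h,
      PySem.Dict.insert_insert_self]

-- A's fold is the canonical modify-append grouping fold over (window, engine) pairs.
theorem foldA_eq (engines : List String) (key : String → Int) :
    engines.foldl (fun (g : PySem.Dict Int (List String)) e =>
        (if g.contains (key e) then g else g.insert (key e) ([] : List String)).modify (key e) []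
          (fun l => l ++ [e]))
      PySem.Dict.empty
    = (engines.map (fun e => (key e, e))).foldl
        (fun (g : PySem.Dict Int (List String)) p => g.modify p.1 [] (fun l => l ++ [p.2]))
        PySem.Dict.empty := by
  rw [List.foldl_map]
  exact PySem.List.foldl_congr_mem engines _ _ _ (fun g e _ => step_eq g (key e) e)

-- ===== VERDICT (by name: the statement is the Claim_ definition above) =====
theorem group_engines_by_window_spec : Claim_equal_group_engines_by_window := by
  intro engines overrides default_window _
  show _ = _
  unfold group_engines_by_window group_engines_by_window_alt
  simp only []
  rw [foldA_eq engines (fun e => (PySem.Dict.ofList overrides).getD e default_window)]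
  set key := fun e => (PySem.Dict.ofList overrides).getD e default_window with hkey
  set pairs := engines.map (fun e => (key e, e)) with hpairs
  have hnd : ((pairs.foldl (fun (g : PySem.Dict Int (List String)) p =>
      g.modify p.1 [] (fun l => l ++ [p.2])) PySem.Dict.empty)).keys.Nodup := by
    exact PySem.Dict.nodup_keys_foldl_modify_key pairs Prod.fst [] _ PySem.Dict.empty
      (by simp)
  rw [PySem.Dict.items_eq_map_keys _ hnd []]
  have hkeys : ((pairs.foldl (fun (g : PySem.Dict Int (List String)) p =>
      g.modify p.1 [] (fun l => l ++ [p.2])) PySem.Dict.empty)).keys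
      = PySem.List.dedup (pairs.map Prod.fst) := by
    rw [PySem.Dict.keys_foldl_modify_key]
    simp [PySem.Set.update, PySem.List.dedup_eq_ofList, PySem.Set.ofList_eq_foldl,
      PySem.Dict.keys_empty]
  rw [hkeys]
  refine List.map_congr_left (fun w _ => ?_)
  rw [PySem.Dict.getD_foldl_modify_append]
  simp [PySem.Dict.getD_empty]
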